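-- pv_equiv track=rewrite | github.com/Fdondi/hackaton-gocalm | multihead_pii/dataset.py | char_span_to_token_span
-- ===== SOURCE A (Python) =====
-- from typing import Dict, List, Optional, Set, Tuple
--
-- def is_valid_token(offset_pair: Tuple[int, int]) -> bool:
--     start, end = offset_pair
--     return not (start == 0 and end == 0)
--
-- def overlap(a_start: int, a_end: int, b_start: int, b_end: int) -> bool:
--     return max(a_start, b_start) < min(a_end, b_end)
--
-- def char_span_to_token_span(
--     offsets: List[Tuple[int, int]],
--     char_start: int,
--     char_end: int,
-- ) -> Optional[Tuple[int, int]]: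
--     token_start = None
--     token_end = None
--     for i, (start, end) in enumerate(offsets):
--         if not is_valid_token((start, end)):
--             continue
--         if overlap(start, end, char_start, char_end):
--             if token_start is None:
--                 token_start = i
--             token_end = i
--     if token_start is None or token_end is None:
--         return None
--     return token_start, token_end
-- ===== SOURCE B (Python) =====
-- from typing import List, Optional, Tuple
--
-- def is_valid_token(offset_pair: Tuple[int, int]) -> bool:
--     start, end = offset_pair
--     return not (start == 0 and end == 0)
--
-- def overlap(a_start: int, a_end: int, b_start: int, b_end: int) -> bool:
--     return max(a_start, b_start) < min(a_end, b_end)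
--
-- def char_span_to_token_span(
--     offsets: List[Tuple[int, int]],
--     char_start: int,
--     char_end: int,
-- ) -> Optional[Tuple[int, int]]:
--     token_start = None
--     for i, pair in enumerate(offsets):
--         if is_valid_token(pair) and overlap(pair[0], pair[1], char_start, char_end):
--             token_start = i
--             break
--     if token_start is None:
--         return None
--     for i in range(len(offsets) - 1, -1, -1):
--         pair = offsets[i]
--         if is_valid_token(pair) and overlap(pair[0], pair[1], char_start, char_end):
--             return token_start, i
-- ===== Notes on version B (the rewrite author's own statement) =====
-- stated objective: alternative
-- what changed: Replaced the single full pass that maintains two optional indices with two early-exit directional scans: a forward scan that breaks at the first matching token and a backward scan that returns at the last one.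
import Mathlib
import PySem

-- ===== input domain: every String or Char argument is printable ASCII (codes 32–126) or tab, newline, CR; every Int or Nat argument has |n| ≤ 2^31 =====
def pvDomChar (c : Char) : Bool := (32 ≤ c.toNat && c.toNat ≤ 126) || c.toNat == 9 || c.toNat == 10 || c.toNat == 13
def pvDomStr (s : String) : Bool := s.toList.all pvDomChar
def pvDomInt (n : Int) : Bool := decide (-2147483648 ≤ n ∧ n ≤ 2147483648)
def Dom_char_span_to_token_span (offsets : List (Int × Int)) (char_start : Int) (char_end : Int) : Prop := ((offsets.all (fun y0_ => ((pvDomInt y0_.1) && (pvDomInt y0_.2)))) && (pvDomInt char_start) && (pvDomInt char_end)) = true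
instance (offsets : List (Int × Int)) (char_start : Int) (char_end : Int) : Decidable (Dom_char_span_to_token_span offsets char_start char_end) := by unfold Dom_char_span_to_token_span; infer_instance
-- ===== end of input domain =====

-- B replaces A's single index-tracking full pass by two early-exit directional scans (forward for the first match, backward for the last); same O(n) cost, different control flow.

-- ===== PORT A =====
-- shared helpers, as in the Python module
def is_valid_token (offset_pair : Int × Int) : Bool :=
  !(offset_pair.1 == 0 && offset_pair.2 == 0)

def overlap (a_start a_end b_start b_end : Int) : Bool :=
  decide (max a_start b_start < min a_end b_end)

-- A's single loop: structural recursion over the list, carrying the running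
-- index i and the state (token_start, token_end), exactly as the Python loop.
def loopA (char_start char_end : Int) :
    List (Int × Int) → Int → Option Int × Option Int → Option Int × Option Int
  | [], _, st => st
  | (s, e) :: rest, i, (ts, te) =>
    if !(is_valid_token (s, e)) then
      loopA char_start char_end rest (i + 1) (ts, te)
    else if overlap s e char_start char_end then
      loopA char_start char_end rest (i + 1)
        ((match ts with | none => some i | some x => some x), some i)
    else
      loopA char_start char_end rest (i + 1) (ts, te)

def char_span_to_token_span (offsets : List (Int × Int)) (char_start : Int) (char_end : Int) : Option (Int × Int) :=
  match loopA char_start char_end offsets 0 (none, none) with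
  | (some a, some b) => some (a, b)
  | _ => none

-- ===== PORT B =====
-- forward scan with early break: first matching index
def fwdB (char_start char_end : Int) : List (Int × Int) → Int → Option Int
  | [], _ => none
  | p :: rest, i =>
    if is_valid_token p && overlap p.1 p.2 char_start char_end then some i
    else fwdB char_start char_end rest (i + 1)

-- backward scan (the Python iterates i = len-1 … 0 reading offsets[i]; here we
-- walk the reversed list with the index counting down): first match from the end
def bwdB (char_start char_end : Int) : List (Int × Int) → Int → Option Int
  | [], _ => none
  | p :: rest, i =>
    if is_valid_token p && overlap p.1 p.2 char_start char_end then some i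
    else bwdB char_start char_end rest (i - 1)

def char_span_to_token_span_alt (offsets : List (Int × Int)) (char_start : Int) (char_end : Int) : Option (Int × Int) :=
  match fwdB char_start char_end offsets 0 with
  | none => none
  | some ts =>
    match bwdB char_start char_end offsets.reverse ((offsets.length : Int) - 1) with
    | none => none   -- unreachable: a forward match implies a backward match
    | some te => some (ts, te)

-- ===== PRECONDITION & SPEC =====
def Spec_char_span_to_token_span (offsets : List (Int × Int)) (char_start : Int) (char_end : Int) (out : Option (Int × Int)) : Prop := out = char_span_to_token_span_alt offsets char_start char_end
instance (offsets : List (Int × Int)) (char_start : Int) (char_end : Int) (out : Option (Int × Int)) : Decidable (Spec_char_span_to_token_span offsets char_start char_end out) := by unfold Spec_char_span_to_token_span; infer_instance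

-- ===== CLAIM (what is proved, stated in full; the proofs are below) =====
def Claim_equal_char_span_to_token_span : Prop := ∀ (offsets : List (Int × Int)) (char_start : Int) (char_end : Int), Dom_char_span_to_token_span offsets char_start char_end → Spec_char_span_to_token_span offsets char_start char_end (char_span_to_token_span offsets char_start char_end)

-- ===== LEMMAS AND PROOFS =====

-- the match predicate both programs test
def okTok (cs ce : Int) (p : Int × Int) : Bool :=
  is_valid_token p && overlap p.1 p.2 cs ce

lemma loopA_step (cs ce : Int) (p : Int × Int) (rest : List (Int × Int)) (i : Int)
    (ts te : Option Int) :
    loopA cs ce (p :: rest) i (ts, te) =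
      if okTok cs ce p then
        loopA cs ce rest (i + 1)
          ((match ts with | none => some i | some x => some x), some i)
      else loopA cs ce rest (i + 1) (ts, te) := by
  obtain ⟨s, e⟩ := p
  by_cases hv : is_valid_token (s, e)
  · by_cases ho : overlap s e cs ce
    · simp [loopA, okTok, hv, ho]
    · simp [loopA, okTok, hv, ho]
  · simp [loopA, okTok, hv]

lemma loopA_append (cs ce : Int) (xs ys : List (Int × Int)) (i : Int)
    (st : Option Int × Option Int) :
    loopA cs ce (xs ++ ys) i st = loopA cs ce ys (i + xs.length) (loopA cs ce xs i st) := by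
  induction xs generalizing i st with
  | nil => simp [loopA]
  | cons p rest ih =>
    obtain ⟨ts, te⟩ := st
    rw [List.cons_append, loopA_step, loopA_step]
    split_ifs with h
    · rw [ih]; congr 1; push_cast [List.length_cons]; ring
    · rw [ih]; congr 1; push_cast [List.length_cons]; ring

lemma loopA_fst (cs ce : Int) (l : List (Int × Int)) (i : Int) (ts te : Option Int) :
    (loopA cs ce l i (ts, te)).1 =
      match ts with
      | some x => some x
      | none => fwdB cs ce l i := by
  induction l generalizing i ts te with
  | nil => cases ts <;> simp [loopA, fwdB]
  | cons p rest ih =>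
    rw [loopA_step]
    by_cases h : okTok cs ce p
    · simp only [h, if_pos]
      cases ts <;> simp [ih, fwdB, okTok] at * <;> simp [fwdB, h.1, h.2]
    · simp only [h, if_neg, Bool.not_eq_true]
      cases ts <;> simp [ih] <;> simp [fwdB, okTok] at h ⊢ <;>
        (intro hv; simp [hv] at h; simp [h])

lemma loopA_snd (cs ce : Int) (l : List (Int × Int)) (i : Int) (ts te : Option Int) :
    (loopA cs ce l i (ts, te)).2 =
      match bwdB cs ce l.reverse (i + l.length - 1) with
      | some b => some b
      | none => te := by
  induction l using List.reverseRecOn generalizing i ts te with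
  | nil => simp [loopA, bwdB]
  | append_singleton xs p ih =>
    rw [loopA_append]
    have hidx : i + (((xs ++ [p]).length : Int)) - 1 = i + xs.length := by
      simp; ring
    have hrev : (xs ++ [p]).reverse = p :: xs.reverse := by simp
    rw [hrev, hidx]
    have hst : loopA cs ce xs i (ts, te) =
        ((loopA cs ce xs i (ts, te)).1, (loopA cs ce xs i (ts, te)).2) := rfl
    rw [hst, loopA_step]
    by_cases h : okTok cs ce p
    · simp only [h, if_pos]
      simp [loopA, bwdB, okTok] at h ⊢
      simp [h.1, h.2]
    · simp only [h, if_neg, Bool.not_eq_true]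
      have hb : bwdB cs ce (p :: xs.reverse) (i + ↑xs.length) =
          bwdB cs ce xs.reverse (i + xs.length - 1) := by
        simp [bwdB, okTok] at h ⊢
        intro hv; simp [hv] at h; simp [h]
      rw [hb, loopA]
      have := ih i ts te
      rw [hst] at this
      simpa using this

lemma fwdB_cons (cs ce : Int) (p : Int × Int) (rest : List (Int × Int)) (i : Int) :
    fwdB cs ce (p :: rest) i =
      if okTok cs ce p then some i else fwdB cs ce rest (i + 1) := by
  simp [fwdB, okTok]

lemma bwdB_cons (cs ce : Int) (p : Int × Int) (rest : List (Int × Int)) (i : Int) :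
    bwdB cs ce (p :: rest) i =
      if okTok cs ce p then some i else bwdB cs ce rest (i - 1) := by
  simp [bwdB, okTok]

lemma fwdB_none (cs ce : Int) (l : List (Int × Int)) (i : Int) :
    fwdB cs ce l i = none ↔ ∀ p ∈ l, okTok cs ce p = false := by
  induction l generalizing i with
  | nil => simp [fwdB]
  | cons p rest ih =>
    rw [fwdB_cons]
    by_cases h : okTok cs ce p
    · simp [h]
    · have h' : okTok cs ce p = false := by simpa using h
      simp [h', ih (i + 1)]

lemma bwdB_none (cs ce : Int) (l : List (Int × Int)) (i : Int) :
    bwdB cs ce l i = none ↔ ∀ p ∈ l, okTok cs ce p = false := by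
  induction l generalizing i with
  | nil => simp [bwdB]
  | cons p rest ih =>
    rw [bwdB_cons]
    by_cases h : okTok cs ce p
    · simp [h]
    · have h' : okTok cs ce p = false := by simpa using h
      simp [h', ih (i - 1)]

-- ===== VERDICT (by name: the statement is the Claim_ definition above) =====
theorem char_span_to_token_span_spec : Claim_equal_char_span_to_token_span := by
  unfold Claim_equal_char_span_to_token_span
  intro l cs ce _
  unfold Spec_char_span_to_token_span char_span_to_token_span char_span_to_token_span_alt
  have hst : loopA cs ce l 0 (none, none) =
      ((loopA cs ce l 0 (none, none)).1, (loopA cs ce l 0 (none, none)).2) := rfl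
  rw [hst, loopA_fst, loopA_snd]
  have hidx : (0 : Int) + (l.length : Int) - 1 = (l.length : Int) - 1 := by ring
  rw [hidx]
  cases hf : fwdB cs ce l 0 with
  | none =>
    have hb : bwdB cs ce l.reverse ((l.length : Int) - 1) = none := by
      rw [bwdB_none]
      intro q hq
      exact ((fwdB_none cs ce l 0).1 hf) q (by simpa using hq)
    simp [hb]
  | some a =>
    cases hb : bwdB cs ce l.reverse ((l.length : Int) - 1) with
    | none =>
      have : fwdB cs ce l 0 = none := by
        rw [fwdB_none]
        intro q hq
        exact ((bwdB_none cs ce l.reverse ((l.length : Int) - 1)).1 hb) q (by simpa using hq)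
      simp [this] at hf
    | some b => simp
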